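-- pv_equiv track=rewrite | github.com/Lego4005/nfl-predictor-api | src/services/realTimeGameFeedService.py | _count_lead_changes
-- ===== SOURCE A (Python) =====
-- from typing import Dict, List, Optional, Any
--
-- def _count_lead_changes(scoring_plays: List[Dict]) -> int:
--     """Count lead changes"""
--     lead_changes = 0
--     previous_leader = None
--
--     for play in scoring_plays:
--         home_score = play.get('home_score_after', 0)
--         away_score = play.get('away_score_after', 0)
--
--         if home_score > away_score:
--             current_leader = 'home'
--         elif away_score > home_score:
--             current_leader = 'away'
--         else:
--             current_leader = 'tie'
--
--         if previous_leader and previous_leader != current_leader and current_leader != 'tie':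
--             lead_changes += 1
--
--         previous_leader = current_leader
--
--     return lead_changes
-- ===== SOURCE B (Python) =====
-- def _count_lead_changes(scoring_plays):
--     """Count lead changes by run-length collapsing the leader sequence:
--     the answer is the number of maximal non-tie leader runs, minus one if
--     the sequence starts with a non-tie run (that first lead is not a change)."""
--     runs = []
--     for play in scoring_plays:
--         h = play.get('home_score_after', 0)
--         a = play.get('away_score_after', 0)
--         l = 'home' if h > a else 'away' if a > h else 'tie'
--         if not runs or runs[-1] != l:
--             runs.append(l)
--     nontie = sum(1 for l in runs if l != 'tie')
--     return nontie - 1 if runs and runs[0] != 'tie' else nontie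
-- ===== Notes on version B (the rewrite author's own statement) =====
-- stated objective: alternative
-- what changed: Instead of A's previous_leader transition state machine, B run-length-collapses the leader sequence and computes the answer as the number of maximal non-tie leader runs minus one if the sequence starts with a non-tie run.
import Mathlib
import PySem

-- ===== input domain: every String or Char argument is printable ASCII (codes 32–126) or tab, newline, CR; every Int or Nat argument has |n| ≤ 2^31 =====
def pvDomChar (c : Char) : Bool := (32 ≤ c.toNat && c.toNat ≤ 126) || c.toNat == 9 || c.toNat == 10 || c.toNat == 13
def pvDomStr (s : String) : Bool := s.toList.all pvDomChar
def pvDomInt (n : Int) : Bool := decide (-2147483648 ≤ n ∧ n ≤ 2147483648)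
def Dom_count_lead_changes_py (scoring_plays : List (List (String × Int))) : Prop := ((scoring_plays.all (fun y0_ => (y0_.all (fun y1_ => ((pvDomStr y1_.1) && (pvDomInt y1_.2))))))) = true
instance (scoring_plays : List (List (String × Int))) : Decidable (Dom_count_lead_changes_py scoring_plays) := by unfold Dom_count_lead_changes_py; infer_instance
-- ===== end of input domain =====

-- B counts maximal non-tie leader runs (minus one for a leading non-tie run) instead of A's transition state machine (objective: alternative).

-- ===== PORT A =====
-- A's fused loop: state = (lead_changes, previous_leader); previous_leader is None or a
-- (nonempty, hence truthy) leader string, so 'if previous_leader' = the Option is some.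
def count_lead_changes_py (scoring_plays : List (List (String × Int))) : Int :=
  (scoring_plays.foldl
    (fun (st : Int × Option String) play =>
      let home_score := (play.lookup "home_score_after").getD 0   -- play.get('home_score_after', 0), first match
      let away_score := (play.lookup "away_score_after").getD 0
      let current_leader := if home_score > away_score then "home"
        else if away_score > home_score then "away" else "tie"
      let lead_changes := match st.2 with
        | some prev => if prev ≠ current_leader ∧ current_leader ≠ "tie" then st.1 + 1 else st.1
        | none => st.1
      (lead_changes, some current_leader))
    (0, none)).1

-- ===== PORT B =====
-- the leader label of one play ('home' if h > a else 'away' if a > h else 'tie')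
def pvLeaderOf (play : List (String × Int)) : String :=
  let h := (play.lookup "home_score_after").getD 0
  let a := (play.lookup "away_score_after").getD 0
  if h > a then "home" else if a > h then "away" else "tie"

-- B: collapse the leader sequence into runs (append the label unless it repeats runs[-1]),
-- then count non-tie runs, minus one if the first run is non-tie.
def count_lead_changes_py_alt (scoring_plays : List (List (String × Int))) : Int :=
  let runs := scoring_plays.foldl
    (fun (runs : List String) play =>
      if runs = [] ∨ runs.getLast? ≠ some (pvLeaderOf play) then runs ++ [pvLeaderOf play] else runs) []
  let nontie : Int := Int.ofNat (runs.countP (fun l => l != "tie"))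
  if runs ≠ [] ∧ runs.head? ≠ some "tie" then nontie - 1 else nontie

-- ===== PRECONDITION & SPEC =====
def Spec_count_lead_changes_py (scoring_plays : List (List (String × Int))) (out : Int) : Prop := out = count_lead_changes_py_alt scoring_plays
instance (scoring_plays : List (List (String × Int))) (out : Int) : Decidable (Spec_count_lead_changes_py scoring_plays out) := by unfold Spec_count_lead_changes_py; infer_instance

-- ===== CLAIM (what is proved, stated in full; the proofs are below) =====
def Claim_equal_count_lead_changes_py : Prop := ∀ (scoring_plays : List (List (String × Int))), Dom_count_lead_changes_py scoring_plays → Spec_count_lead_changes_py scoring_plays (count_lead_changes_py scoring_plays)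

-- ===== LEMMAS AND PROOFS =====

-- A's count as a recursion on the leader-label list, given the previous leader.
def pvG (prev : String) : List String → Int
  | [] => 0
  | y :: t => (if prev ≠ y ∧ y ≠ "tie" then 1 else 0) + pvG y t

-- the run-length collapse of a label list whose last emitted label is p
def pvD (p : String) : List String → List String
  | [] => [p]
  | y :: t => if y = p then pvD p t else p :: pvD y t

def pvNT (l : List String) : Int := Int.ofNat (l.countP (fun s => s != "tie"))

theorem pvA_loop (rest : List (List (String × Int))) (acc : Int) (prev : String) :
    (rest.foldl
      (fun (st : Int × Option String) play =>
        let home_score := (play.lookup "home_score_after").getD 0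
        let away_score := (play.lookup "away_score_after").getD 0
        let current_leader := if home_score > away_score then "home"
          else if away_score > home_score then "away" else "tie"
        let lead_changes := match st.2 with
          | some p => if p ≠ current_leader ∧ current_leader ≠ "tie" then st.1 + 1 else st.1
          | none => st.1
        (lead_changes, some current_leader))
      (acc, some prev)).1 = acc + pvG prev (rest.map pvLeaderOf) := by
  induction rest generalizing acc prev with
  | nil => simp [pvG]
  | cons p t ih =>
      simp only [List.foldl_cons, List.map_cons, pvG, pvLeaderOf]
      rw [ih]
      split_ifs <;> simp_all <;> ring

-- B's foldl over plays, once the run list is nonempty with last label p, builds pvD.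
theorem pvB_plays (plays : List (List (String × Int))) (acc : List String) (p : String) :
    (plays.foldl
      (fun (runs : List String) play =>
        if runs = [] ∨ runs.getLast? ≠ some (pvLeaderOf play) then runs ++ [pvLeaderOf play] else runs)
      (acc ++ [p])) = acc ++ pvD p (plays.map pvLeaderOf) := by
  induction plays generalizing acc p with
  | nil => simp [pvD]
  | cons q t ih =>
      simp only [List.foldl_cons, List.map_cons, pvD]
      have hl : (acc ++ [p]).getLast? = some p := by simp
      by_cases h : pvLeaderOf q = p
      · rw [h, if_neg (by simp [hl]), ih]
        simp
      · rw [if_pos (Or.inr (by simp [hl]; exact fun e => h e.symm))]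
        rw [ih (acc ++ [p]) (pvLeaderOf q)]
        simp [h]

theorem pvD_head (ls : List String) (p : String) : ∃ r, pvD p ls = p :: r := by
  induction ls generalizing p with
  | nil => exact ⟨[], by simp [pvD]⟩
  | cons y t ih =>
      by_cases h : y = p
      · subst h
        obtain ⟨r, hr⟩ := ih y
        exact ⟨r, by simp [pvD, hr]⟩
      · exact ⟨pvD y t, by simp [pvD, h]⟩

theorem pvNT_pvD (ls : List String) (p : String) :
    pvNT (pvD p ls) = (if p ≠ "tie" then 1 else 0) + pvG p ls := by
  induction ls generalizing p with
  | nil =>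
      simp only [pvD, pvNT, pvG, List.countP_cons, List.countP_nil]
      by_cases h : p = "tie" <;> simp [h]
  | cons y t ih =>
      by_cases h : y = p
      · subst h
        have hy := ih y
        simp [pvD, pvG, hy]
      · have hy := ih y
        have hpy : p ≠ y := fun e => h e.symm
        simp only [pvD, if_neg h, pvG, pvNT, List.countP_cons] at *
        by_cases hp : p = "tie" <;> by_cases ht : y = "tie" <;>
          simp_all <;> omega

-- ===== VERDICT (by name: the statement is the Claim_ definition above) =====
theorem count_lead_changes_py_spec : Claim_equal_count_lead_changes_py := by
  intro sp _
  unfold Spec_count_lead_changes_py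
  cases sp with
  | nil => rfl
  | cons q t =>
      have hA : count_lead_changes_py (q :: t) = 0 + pvG (pvLeaderOf q) (t.map pvLeaderOf) := by
        unfold count_lead_changes_py
        rw [List.foldl_cons]
        exact pvA_loop t 0 (pvLeaderOf q)
      have hfold : List.foldl
          (fun (runs : List String) play =>
            if runs = [] ∨ runs.getLast? ≠ some (pvLeaderOf play) then runs ++ [pvLeaderOf play] else runs)
          [] (q :: t) = pvD (pvLeaderOf q) (t.map pvLeaderOf) := by
        rw [List.foldl_cons]
        exact pvB_plays t [] (pvLeaderOf q)
      rw [hA]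
      unfold count_lead_changes_py_alt
      simp only [hfold]
      obtain ⟨r, hr⟩ := pvD_head (t.map pvLeaderOf) (pvLeaderOf q)
      have hnt := pvNT_pvD (t.map pvLeaderOf) (pvLeaderOf q)
      rw [hr] at hnt
      simp only [pvNT] at hnt
      rw [hr]
      by_cases hx : pvLeaderOf q = "tie"
      · simp [hx] at hnt ⊢
        omega
      · simp [hx] at hnt ⊢
        omega
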